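-- pv_equiv track=rewrite | github.com/yoshikawa-river/keiba-yy | src/data/validators/data_validator.py | _validate_odds_combination
-- ===== SOURCE A (Python) =====
-- def _validate_odds_combination(odds_type: str, combination: str) -> bool:
--     """オッズの組み合わせを検証"""
--     parts = combination.split("-")
--
--     if odds_type in ["win", "place"]:
--         return len(parts) == 1 and parts[0].isdigit()
--     if odds_type in ["exacta", "quinella", "wide"]:
--         return (
--             len(parts) == 2
--             and all(p.isdigit() for p in parts)
--             and parts[0] != parts[1]
--         )
--     if odds_type in ["trio", "trifecta"]:
--         return (
--             len(parts) == 3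
--             and all(p.isdigit() for p in parts)
--             and len(set(parts)) == 3
--         )
--
--     return False
-- ===== SOURCE B (Python) =====
-- def _parse(rest: str, k: int, seen: list) -> bool:
--     """Consume one digit run, require it new, then end (k==1) or '-' and recurse."""
--     j = 0
--     while j < len(rest) and rest[j].isdigit():
--         j += 1
--     if j == 0:
--         return False
--     part = rest[:j]
--     if part in seen:
--         return False
--     if k == 1:
--         return j == len(rest)
--     return j < len(rest) and rest[j] == "-" and _parse(rest[j + 1:], k - 1, seen + [part])
--
--
-- def _validate_odds_combination(odds_type: str, combination: str) -> bool:
--     need = {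
--         "win": 1, "place": 1,
--         "exacta": 2, "quinella": 2, "wide": 2,
--         "trio": 3, "trifecta": 3,
--     }.get(odds_type)
--     if need is None:
--         return False
--     return _parse(combination, need, [])
-- ===== Notes on version B (the rewrite author's own statement) =====
-- stated objective: alternative
-- what changed: Replaces A's split-then-check-per-branch design with a single-pass recursive-descent parser: a dict gives the required part count, then _parse consumes one digit run at a time, rejects repeats against an accumulated seen list, and requires '-' separators and end-of-string, never building a split list.
import Mathlib
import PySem

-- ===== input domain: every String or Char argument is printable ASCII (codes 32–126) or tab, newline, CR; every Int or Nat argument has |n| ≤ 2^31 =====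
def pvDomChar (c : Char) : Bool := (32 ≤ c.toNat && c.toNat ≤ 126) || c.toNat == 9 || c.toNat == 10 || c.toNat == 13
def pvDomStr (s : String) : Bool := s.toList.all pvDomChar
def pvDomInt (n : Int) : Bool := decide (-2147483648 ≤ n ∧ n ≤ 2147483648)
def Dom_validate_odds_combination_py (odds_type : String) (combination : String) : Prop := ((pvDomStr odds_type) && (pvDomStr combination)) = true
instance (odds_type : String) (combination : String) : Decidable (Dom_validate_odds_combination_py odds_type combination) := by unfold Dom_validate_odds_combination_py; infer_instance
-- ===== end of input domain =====

-- B replaces A's split-then-check design with a recursive-descent parser that consumes one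
-- digit run at a time (count from a dict, repeats rejected against a seen list); objective: alternative.


-- ===== PORT A =====
-- parts[0]/parts[1] are reached only under the preceding length check, so getD's default is never used
def validate_odds_combination_py (odds_type : String) (combination : String) : Bool :=
  let parts := (PySem.Str.split? combination "-").getD []  -- sep "-" ≠ "": split? is always some
  if ["win", "place"].contains odds_type then
    decide (parts.length = 1) && PySem.Str.strIsdigit (parts.getD 0 "")
  else if ["exacta", "quinella", "wide"].contains odds_type then
    decide (parts.length = 2) && parts.all (fun p => PySem.Str.strIsdigit p)
      && !(parts.getD 0 "" == parts.getD 1 "")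
  else if ["trio", "trifecta"].contains odds_type then
    decide (parts.length = 3) && parts.all (fun p => PySem.Str.strIsdigit p)
      && decide (PySem.Set.len (PySem.Set.ofList parts) = 3)
  else
    false

-- ===== PORT B =====
-- Source B's _parse: the index-j while loop reading a digit run is rest.takeWhile/dropWhile on the
-- per-char isdigit test (PySem.Chars.isdigit = Python's c.isdigit() on the ASCII domain);
-- rest[:j] is the run, rest[j+1:] the list after the '-' separator.
def pvParseB (rest : List Char) (k : Nat) (seen : List (List Char)) : Bool :=
  if (rest.takeWhile PySem.Chars.isdigit).isEmpty then false     -- j == 0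
  else if seen.contains (rest.takeWhile PySem.Chars.isdigit) then false  -- part in seen
  else if k == 1 then (rest.dropWhile PySem.Chars.isdigit).isEmpty      -- j == len(rest)
  else match hd : rest.dropWhile PySem.Chars.isdigit with
    | '-' :: t => pvParseB t (k - 1) (seen ++ [rest.takeWhile PySem.Chars.isdigit])
    | _ => false
termination_by rest.length
decreasing_by
  have h1 : (rest.dropWhile PySem.Chars.isdigit).length ≤ rest.length := rest.length_dropWhile_le _
  rw [hd] at h1; simp at h1; omega

def validate_odds_combination_py_alt (odds_type : String) (combination : String) : Bool :=
  let need := PySem.Dict.get?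
    (PySem.Dict.ofList [("win", 1), ("place", 1), ("exacta", 2), ("quinella", 2), ("wide", 2), ("trio", 3), ("trifecta", 3)])
    odds_type
  match need with
  | none => false
  | some k => pvParseB combination.toList k []

-- ===== PRECONDITION & SPEC =====
def Spec_validate_odds_combination_py (odds_type : String) (combination : String) (out : Bool) : Prop := out = validate_odds_combination_py_alt odds_type combination
instance (odds_type : String) (combination : String) (out : Bool) : Decidable (Spec_validate_odds_combination_py odds_type combination out) := by unfold Spec_validate_odds_combination_py; infer_instance

-- ===== CLAIM (what is proved, stated in full; the proofs are below) =====
def Claim_equal_validate_odds_combination_py : Prop := ∀ (odds_type : String) (combination : String), Dom_validate_odds_combination_py odds_type combination → Spec_validate_odds_combination_py odds_type combination (validate_odds_combination_py odds_type combination)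

-- ===== LEMMAS AND PROOFS =====

-- proof-side clean model of combination.split("-") on char lists
def splitDash : List Char → List (List Char)
  | [] => [[]]
  | c :: rest =>
    if c = '-' then [] :: splitDash rest
    else match splitDash rest with
      | p :: ps => (c :: p) :: ps
      | [] => [[c]]

theorem splitDash_ne_nil (cs : List Char) : splitDash cs ≠ [] := by
  cases cs with
  | nil => simp [splitDash]
  | cons c rest =>
    simp only [splitDash]
    split_ifs
    · simp
    · cases h : splitDash rest <;> simp

-- head-part/rest characterisation of splitDash
theorem splitDash_eq (cs : List Char) :
    splitDash cs =
      match cs.dropWhile (fun c => !(c == '-')) with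
      | [] => [cs.takeWhile (fun c => !(c == '-'))]
      | _ :: rest => cs.takeWhile (fun c => !(c == '-')) :: splitDash rest := by
  induction cs with
  | nil => simp [splitDash]
  | cons c rest ih =>
    by_cases hc : c = '-'
    · subst hc; simp [splitDash, List.dropWhile, List.takeWhile]
    · simp only [splitDash, if_neg hc, List.dropWhile, List.takeWhile,
        show ((c == '-') = false) from by simpa using hc, Bool.not_false]
      rw [ih]
      cases hdw : rest.dropWhile (fun c => !(c == '-')) <;> simp

-- go with enough fuel computes splitDash (accumulator form)
theorem splitOn_go_spec (fuel : Nat) :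
    ∀ (l cur : List Char) (acc : List (List Char)), l.length < fuel →
      PySem.Chars.splitOn.go ['-'] fuel l cur acc =
        acc.reverse ++
          (match splitDash l with
           | p :: ps => (cur.reverse ++ p) :: ps
           | [] => [cur.reverse]) := by
  induction fuel with
  | zero => intro l cur acc h; omega
  | succ fuel ih =>
    intro l cur acc h
    cases l with
    | nil => simp [PySem.Chars.splitOn.go, splitDash]
    | cons c rest =>
      by_cases hc : c = '-'
      · subst hc
        rw [show PySem.Chars.splitOn.go ['-'] (fuel+1) ('-'::rest) cur acc =
              PySem.Chars.splitOn.go ['-'] fuel rest [] (cur.reverse :: acc) from by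
            simp [PySem.Chars.splitOn.go, List.isPrefixOf]]
        rw [ih rest [] (cur.reverse :: acc) (by simpa using Nat.lt_of_succ_lt_succ h)]
        have hne := splitDash_ne_nil rest
        cases hsp : splitDash rest with
        | nil => exact absurd hsp hne
        | cons p ps => simp [splitDash, hsp]
      · rw [show PySem.Chars.splitOn.go ['-'] (fuel+1) (c::rest) cur acc =
              PySem.Chars.splitOn.go ['-'] fuel rest (c :: cur) acc from by
            simp [PySem.Chars.splitOn.go, List.isPrefixOf, Ne.symm hc]]
        rw [ih rest (c :: cur) acc (by simpa using Nat.lt_of_succ_lt_succ h)]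
        have hne := splitDash_ne_nil rest
        cases hsp : splitDash rest with
        | nil => exact absurd hsp hne
        | cons p ps => simp [splitDash, if_neg hc, hsp]

theorem splitOn_eq_splitDash (cs : List Char) :
    PySem.Chars.splitOn cs ['-'] = splitDash cs := by
  have h := splitOn_go_spec (cs.length + 1) cs [] [] (by omega)
  have hne := splitDash_ne_nil cs
  cases hsp : splitDash cs with
  | nil => exact absurd hsp hne
  | cons p ps => simpa [PySem.Chars.splitOn, hsp] using h

-- dedup size equals list size exactly on duplicate-free lists
theorem len_ofList_eq_length_iff {a : Type} [BEq a] [LawfulBEq a] (l : List a) :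
    (PySem.Set.ofList l).length = l.length ↔ l.Nodup := by
  induction l using List.reverseRecOn with
  | nil => simp
  | append_singleton xs x ih =>
    rw [PySem.Set.ofList_append_singleton]
    by_cases hx : x ∈ PySem.Set.ofList xs
    · rw [PySem.Set.add_of_mem hx]
      have hle := PySem.Set.length_ofList_le xs
      have hmem : x ∈ xs := (PySem.Set.mem_ofList xs x).mp hx
      simp only [List.length_append, List.length_cons, List.length_nil, List.nodup_append]
      constructor
      · intro h; omega
      · intro h; exact absurd hmem (by simp at h; tauto)
    · rw [PySem.Set.add_of_not_mem hx]
      have hmem : x ∉ xs := fun h => hx ((PySem.Set.mem_ofList xs x).mpr h)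
      simp only [List.length_append, List.length_cons, List.length_nil, Nat.add_left_inj, ih,
        List.nodup_append, List.nodup_cons, List.nodup_nil, and_true]
      constructor
      · intro h
        refine ⟨h, by simp, fun a ha b hb => ?_⟩
        simp at hb; subst hb; exact fun he => hmem (he ▸ ha)
      · tauto

theorem splitDash_no_dash (cs : List Char) (h : ∀ c ∈ cs, ¬ c = '-') : splitDash cs = [cs] := by
  induction cs with
  | nil => rfl
  | cons c rest ih =>
    have hc : ¬ c = '-' := h c (by simp)
    simp only [splitDash, if_neg hc, ih (fun x hx => h x (by simp [hx]))]

theorem splitDash_append_dash (part t : List Char) (h : ∀ c ∈ part, ¬ c = '-') :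
    splitDash (part ++ '-' :: t) = part :: splitDash t := by
  induction part with
  | nil => simp [splitDash]
  | cons c p ih =>
    have hc : ¬ c = '-' := h c (by simp)
    simp only [List.cons_append, splitDash, if_neg hc, ih (fun x hx => h x (by simp [hx]))]

theorem splitDash_head (cs : List Char) :
    ∃ ps, splitDash cs = (cs.takeWhile (fun c => !(c == '-'))) :: ps := by
  rw [splitDash_eq cs]
  cases h : cs.dropWhile (fun c => !(c == '-')) <;> simp

theorem mem_takeWhile_no_dash (part t : List Char) (d : Char)
    (h : ∀ c ∈ part, ¬ c = '-') (hd : ¬ d = '-') :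
    d ∈ (part ++ d :: t).takeWhile (fun c => !(c == '-')) := by
  induction part with
  | nil => simp [show ((d == '-') = false) from by simpa using hd]
  | cons c p ih =>
    have hc : ¬ c = '-' := h c (by simp)
    simp only [List.cons_append, List.takeWhile,
      show ((c == '-') = false) from by simpa using hc, Bool.not_false]
    exact List.mem_cons_of_mem _ (ih (fun x hx => h x (by simp [hx])))

-- the parser equals the uniform split-based check
theorem pvParseB_spec (n : Nat) : ∀ (cs : List Char) (k : Nat) (seen : List (List Char)),
    cs.length ≤ n → 1 ≤ k →
    pvParseB cs k seen =
      (decide ((splitDash cs).length = k)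
        && (splitDash cs).all PySem.Chars.strIsdigit
        && decide ((splitDash cs).Nodup ∧ ∀ p ∈ splitDash cs, p ∉ seen)) := by
  induction n with
  | zero =>
    intro cs k seen h hk
    have hnil : cs = [] := by cases cs with | nil => rfl | cons c r => simp at h
    subst hnil
    rw [pvParseB]
    simp [splitDash, PySem.Chars.strIsdigit]
  | succ n ih =>
    intro cs k seen h hk
    by_cases hpart : (cs.takeWhile PySem.Chars.isdigit).isEmpty
    · -- empty digit run: both sides false
      rw [pvParseB, if_pos hpart]
      cases cs with
      | nil => simp [splitDash, PySem.Chars.strIsdigit]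
      | cons c rest =>
        have hcd : PySem.Chars.isdigit c = false := by
          by_contra hcc
          simp only [List.takeWhile] at hpart
          rw [show PySem.Chars.isdigit c = true from by simpa using hcc] at hpart
          simp at hpart
        obtain ⟨ps, hps⟩ := splitDash_head (c :: rest)
        by_cases hc : c = '-'
        · subst hc
          rw [hps]
          simp [List.takeWhile, PySem.Chars.strIsdigit]
        · rw [hps]
          simp only [List.takeWhile, show ((c == '-') = false) from by simpa using hc,
            Bool.not_false, List.all_cons]
          simp [PySem.Chars.strIsdigit, hcd]
    · have hcs : cs = cs.takeWhile PySem.Chars.isdigit ++ cs.dropWhile PySem.Chars.isdigit :=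
        (List.takeWhile_append_dropWhile).symm
      have hdigs : ∀ c ∈ cs.takeWhile PySem.Chars.isdigit, PySem.Chars.isdigit c = true :=
        fun c hc => List.mem_takeWhile_imp hc
      have hnd : ∀ c ∈ cs.takeWhile PySem.Chars.isdigit, ¬ c = '-' := by
        intro c hc he; subst he
        have := hdigs _ hc
        simp [PySem.Chars.isdigit] at this
      have hsdpart : PySem.Chars.strIsdigit (cs.takeWhile PySem.Chars.isdigit) = true := by
        simp only [PySem.Chars.strIsdigit, Bool.and_eq_true, List.all_eq_true]
        exact ⟨by simpa using hpart, hdigs⟩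
      cases htail : cs.dropWhile PySem.Chars.isdigit with
      | nil =>
        have hcseq : cs = cs.takeWhile PySem.Chars.isdigit := by
          conv_lhs => rw [hcs]
          rw [htail, List.append_nil]
        have hsp : splitDash cs = [cs] := splitDash_no_dash cs (fun c hc => hnd c (by rw [← hcseq]; exact hc))
        rw [pvParseB, if_neg hpart, hsp, htail]
        by_cases hseen : seen.contains (cs.takeWhile PySem.Chars.isdigit)
        · rw [if_pos hseen]
          have : cs ∈ seen := by rw [hcseq]; simpa using hseen
          simp [this]
        · rw [if_neg hseen]
          have hcsseen : cs ∉ seen := by rw [hcseq]; simpa using hseen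
          by_cases hk1 : k = 1
          · subst hk1
            have hsdcs : PySem.Chars.strIsdigit cs = true := by rw [hcseq]; exact hsdpart
            simp [hcsseen, hsdcs]
          · rw [if_neg (by simpa using hk1)]
            simp [show ¬ (1 = k) from fun he => hk1 he.symm]
      | cons d t =>
        have hddig : PySem.Chars.isdigit d = false := by
          have := List.head?_dropWhile_not PySem.Chars.isdigit cs
          rw [htail] at this; simpa using this
        by_cases hdash : d = '-'
        · subst hdash
          have hsp : splitDash cs = cs.takeWhile PySem.Chars.isdigit :: splitDash t := by
            conv_lhs => rw [hcs, htail]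
            exact splitDash_append_dash _ _ hnd
          rw [pvParseB, if_neg hpart, hsp, htail]
          by_cases hseen : seen.contains (cs.takeWhile PySem.Chars.isdigit)
          · rw [if_pos hseen]
            have : cs.takeWhile PySem.Chars.isdigit ∈ seen := by simpa using hseen
            simp [this]
          · rw [if_neg hseen]
            have hpseen : cs.takeWhile PySem.Chars.isdigit ∉ seen := by simpa using hseen
            by_cases hk1 : k = 1
            · subst hk1
              have := splitDash_ne_nil t
              cases hsp2 : splitDash t with
              | nil => exact absurd hsp2 this
              | cons p ps => simp
            · rw [if_neg (by simpa using hk1)]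
              have hlen : t.length ≤ n := by
                have h1 : cs.length = (cs.takeWhile PySem.Chars.isdigit).length + t.length + 1 := by
                  conv_lhs => rw [hcs, htail]
                  simp; omega
                have h2 : 1 ≤ (cs.takeWhile PySem.Chars.isdigit).length := by
                  cases hq : cs.takeWhile PySem.Chars.isdigit with
                  | nil => rw [hq] at hpart; simp at hpart
                  | cons a b => simp
                omega
              have hk2 : 2 ≤ k := by omega
              show pvParseB t (k - 1) (seen ++ [cs.takeWhile PySem.Chars.isdigit]) = _
              rw [ih t (k - 1) (seen ++ [cs.takeWhile PySem.Chars.isdigit]) hlen (by omega)]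
              -- boolean reconciliation
              rw [show decide ((splitDash t).length = k - 1)
                    = decide ((cs.takeWhile PySem.Chars.isdigit :: splitDash t).length = k) from
                  decide_eq_decide.mpr (by simp; omega)]
              rw [show decide ((splitDash t).Nodup ∧
                      ∀ p ∈ splitDash t, p ∉ seen ++ [cs.takeWhile PySem.Chars.isdigit])
                    = decide ((cs.takeWhile PySem.Chars.isdigit :: splitDash t).Nodup ∧
                      ∀ p ∈ cs.takeWhile PySem.Chars.isdigit :: splitDash t, p ∉ seen) from
                  decide_eq_decide.mpr (by
                    simp only [List.nodup_cons, List.mem_append,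
                      List.mem_cons, forall_eq_or_imp, not_or]
                    constructor
                    · rintro ⟨hnodup, hall⟩
                      exact ⟨⟨fun hm => ((hall _ hm).2).1 rfl, hnodup⟩, hpseen,
                        fun p hp => (hall p hp).1⟩
                    · rintro ⟨⟨hnm, hnodup⟩, -, hall⟩
                      exact ⟨hnodup, fun p hp =>
                        ⟨hall p hp, fun he => hnm (by rw [he] at hp; exact hp), by simp⟩⟩)]
              simp [hsdpart, Bool.and_assoc, Bool.and_comm, Bool.and_left_comm]
        · -- separator is not '-': parser fails, and the first dash-part contains d, a non-digit
          obtain ⟨ps, hps⟩ := splitDash_head cs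
          have hdmem : d ∈ cs.takeWhile (fun c => !(c == '-')) := by
            have hm := mem_takeWhile_no_dash (cs.takeWhile PySem.Chars.isdigit) t d hnd hdash
            rw [show cs.takeWhile PySem.Chars.isdigit ++ d :: t = cs from by
              rw [← htail]; exact List.takeWhile_append_dropWhile] at hm
            exact hm
          have hhead : PySem.Chars.strIsdigit (cs.takeWhile (fun c => !(c == '-'))) = false := by
            have hall : (cs.takeWhile (fun c => !(c == '-'))).all PySem.Chars.isdigit = false := by
              apply Bool.eq_false_iff.mpr; intro hall
              rw [List.all_eq_true] at hall
              have := hall d hdmem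
              rw [hddig] at this; exact Bool.false_ne_true this
            simp [PySem.Chars.strIsdigit, hall]
          rw [pvParseB, if_neg hpart, hps, htail]
          simp only [List.all_cons, hhead, Bool.false_and, Bool.and_false]
          split_ifs
          · rfl
          · simp
          · split
            · rename_i t1 heq
              injection heq with h1 h2
              exact absurd h1 hdash
            · rfl


-- A's win/place branch in the uniform (count, all-digits, set-size) form
theorem req1 (parts : List String) :
    (decide (parts.length = 1) && PySem.Str.strIsdigit (parts.getD 0 ""))
    = (decide (parts.length = 1) && parts.all (fun p => PySem.Str.strIsdigit p)
       && decide (PySem.Set.len (PySem.Set.ofList parts) = 1)) := by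
  match parts with
  | [] => rfl
  | [p] => simp [PySem.Set.ofList, PySem.Set.add, PySem.Set.len, PySem.Set.empty, PySem.Set.contains]
  | p :: q :: rest => simp

-- A's exacta/quinella/wide branch in the uniform form
theorem req2 (parts : List String) :
    (decide (parts.length = 2) && parts.all (fun p => PySem.Str.strIsdigit p)
      && !(parts.getD 0 "" == parts.getD 1 ""))
    = (decide (parts.length = 2) && parts.all (fun p => PySem.Str.strIsdigit p)
       && decide (PySem.Set.len (PySem.Set.ofList parts) = 2)) := by
  match parts with
  | [] => rfl
  | [p] => rfl
  | [a, b] =>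
    by_cases h : a = b
    · subst h
      simp [PySem.Set.ofList, PySem.Set.add, PySem.Set.len, PySem.Set.empty, PySem.Set.contains]
    · simp [PySem.Set.ofList, PySem.Set.add, PySem.Set.len, PySem.Set.empty, PySem.Set.contains, h,
        Ne.symm h]
  | a :: b :: c :: rest => simp

-- the uniform split-based check equals the parser
theorem uniform_bridge (s : String) (k : Nat) (hk : 1 ≤ k) :
    (decide (((PySem.Str.split? s "-").getD []).length = k)
      && ((PySem.Str.split? s "-").getD []).all (fun p => PySem.Str.strIsdigit p)
      && decide (PySem.Set.len (PySem.Set.ofList ((PySem.Str.split? s "-").getD [])) = (k : Int)))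
    = pvParseB s.toList k [] := by
  have hchars : PySem.Chars.split? s.toList ("-" : String).toList = some (splitDash s.toList) := by
    rw [show ("-" : String).toList = ['-'] from rfl]
    simp [PySem.Chars.split?, splitOn_eq_splitDash]
  have hmapped := PySem.Str.split?_map s "-"
  rw [hchars] at hmapped
  cases hq : PySem.Str.split? s "-" with
  | none => rw [hq] at hmapped; simp at hmapped
  | some parts =>
    rw [hq] at hmapped
    simp only [Option.map_some] at hmapped
    have hmap : parts.map String.toList = splitDash s.toList := by injection hmapped
    rw [pvParseB_spec (s.toList.length) s.toList k [] (le_refl _) hk]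
    simp only [Option.getD_some]
    have hlen_eq : parts.length = (splitDash s.toList).length := by
      rw [← hmap, List.length_map]
    have hall_eq : parts.all (fun p => PySem.Str.strIsdigit p)
        = (splitDash s.toList).all PySem.Chars.strIsdigit := by
      rw [← hmap, List.all_map]
      simp only [PySem.Str.strIsdigit_eq]
      rfl
    have hnodup_iff : parts.Nodup ↔ (splitDash s.toList).Nodup := by
      rw [← hmap]
      exact (List.nodup_map_iff (fun a b h => String.toList_inj.mp h)).symm
    rw [Bool.eq_iff_iff]
    simp only [Bool.and_eq_true, decide_eq_true_eq, List.not_mem_nil,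
      not_false_iff, implies_true, and_true]
    constructor
    · rintro ⟨⟨h1, h2⟩, h3⟩
      refine ⟨⟨by rw [← hlen_eq]; exact h1, by rw [← hall_eq]; exact h2⟩, ?_⟩
      rw [PySem.Set.len_eq] at h3
      have hlen2 : (PySem.Set.ofList parts).length = parts.length := by
        have := Int.natCast_inj.mp h3
        omega
      exact hnodup_iff.mp ((len_ofList_eq_length_iff parts).mp hlen2)
    · rintro ⟨⟨h1, h2⟩, h3⟩
      refine ⟨⟨by rw [hlen_eq]; exact h1, by rw [hall_eq]; exact h2⟩, ?_⟩
      rw [PySem.Set.len_eq]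
      have hlen2 : (PySem.Set.ofList parts).length = parts.length :=
        (len_ofList_eq_length_iff parts).mpr (hnodup_iff.mpr h3)
      rw [hlen2, hlen_eq, h1]

-- ===== VERDICT (by name: the statement is the Claim_ definition above) =====
theorem validate_odds_combination_py_spec : Claim_equal_validate_odds_combination_py := by
  intro odds_type combination _
  unfold Spec_validate_odds_combination_py
  have hb1 := uniform_bridge combination 1 (by norm_num)
  have hb2 := uniform_bridge combination 2 (by norm_num)
  have hb3 := uniform_bridge combination 3 (by norm_num)
  simp only [Nat.cast_one, Nat.cast_ofNat] at hb1 hb2 hb3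
  by_cases h1 : odds_type = "win"
  · subst h1; exact (req1 ((PySem.Str.split? combination "-").getD [])).trans hb1
  by_cases h2 : odds_type = "place"
  · subst h2; exact (req1 ((PySem.Str.split? combination "-").getD [])).trans hb1
  by_cases h3 : odds_type = "exacta"
  · subst h3; exact (req2 ((PySem.Str.split? combination "-").getD [])).trans hb2
  by_cases h4 : odds_type = "quinella"
  · subst h4; exact (req2 ((PySem.Str.split? combination "-").getD [])).trans hb2
  by_cases h5 : odds_type = "wide"
  · subst h5; exact (req2 ((PySem.Str.split? combination "-").getD [])).trans hb2
  by_cases h6 : odds_type = "trio"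
  · subst h6; exact hb3
  by_cases h7 : odds_type = "trifecta"
  · subst h7; exact hb3
  have e1 : (("win" : String) == odds_type) = false := by simpa using Ne.symm h1
  have e2 : (("place" : String) == odds_type) = false := by simpa using Ne.symm h2
  have e3 : (("exacta" : String) == odds_type) = false := by simpa using Ne.symm h3
  have e4 : (("quinella" : String) == odds_type) = false := by simpa using Ne.symm h4
  have e5 : (("wide" : String) == odds_type) = false := by simpa using Ne.symm h5
  have e6 : (("trio" : String) == odds_type) = false := by simpa using Ne.symm h6
  have e7 : (("trifecta" : String) == odds_type) = false := by simpa using Ne.symm h7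
  simp [validate_odds_combination_py, validate_odds_combination_py_alt,
    PySem.Dict.ofList, PySem.Dict.update, PySem.Dict.insert, PySem.Dict.empty, PySem.Dict.get?,
    PySem.Dict.contains, List.foldl, List.find?, e1, e2, e3, e4, e5, e6, e7, h1, h2, h3, h4, h5, h6, h7]
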